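-- pv_equiv track=rewrite | github.com/DhruvGrover28/IBM-Skillsbuild-Project | backend/utils/scraper_helpers.py | is_remote_job
-- ===== SOURCE A (Python) =====
-- def is_remote_job(text: str) -> bool:
--     """Check if job allows remote work"""
--     if not text:
--         return False
--
--     text = text.lower()
--     remote_indicators = [
--         'remote', 'work from home', 'wfh', 'telecommute',
--         'distributed', 'anywhere', 'home office'
--     ]
--
--     return any(indicator in text for indicator in remote_indicators)
-- ===== SOURCE B (Python) =====
-- _KEYWORDS = ('remote', 'work from home', 'wfh', 'telecommute',
--              'distributed', 'anywhere', 'home office')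
--
--
-- def is_remote_job(text: str) -> bool:
--     """Single left-to-right positional scan: at each position of the lowered
--     text, test whether some keyword starts there (prefix match), instead of
--     running a separate substring search per keyword."""
--     if not text:
--         return False
--     t = text.lower()
--     return any(t.startswith(kw, j) for j in range(len(t)) for kw in _KEYWORDS)
-- ===== Notes on version B (the rewrite author's own statement) =====
-- stated objective: alternative
-- what changed: B replaces A's per-keyword substring searches (`any(kw in text ...)`) by one positional left-to-right scan of the lowered text that at each index tests whether some keyword starts there via startswith(kw, j).
import Mathlib
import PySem

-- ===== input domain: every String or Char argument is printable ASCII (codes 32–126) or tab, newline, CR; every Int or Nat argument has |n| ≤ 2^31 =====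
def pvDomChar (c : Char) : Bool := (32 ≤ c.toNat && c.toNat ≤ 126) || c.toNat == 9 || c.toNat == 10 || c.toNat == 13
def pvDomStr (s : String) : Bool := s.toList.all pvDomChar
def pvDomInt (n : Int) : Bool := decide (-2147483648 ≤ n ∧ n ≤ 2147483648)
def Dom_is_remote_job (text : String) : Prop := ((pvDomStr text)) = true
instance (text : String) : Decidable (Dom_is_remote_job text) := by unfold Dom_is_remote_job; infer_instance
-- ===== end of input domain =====

-- B replaces A's per-keyword substring searches by one positional scan of the
-- lowered text testing at each position whether some keyword starts there
-- (objective: alternative traversal; no speed claim).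

-- ===== PORT A =====
-- A: guard on empty text, lower, then any(indicator in text) over the keyword list.
def is_remote_job (text : String) : Bool :=
  if text = "" then false
  else
    let t := PySem.Str.lower text
    (["remote", "work from home", "wfh", "telecommute",
      "distributed", "anywhere", "home office"] : List String).any
      (fun indicator => PySem.Str.isIn indicator t)

-- ===== PORT B =====
def pvKeywords : List (List Char) :=
  ["remote".toList, "work from home".toList, "wfh".toList, "telecommute".toList,
   "distributed".toList, "anywhere".toList, "home office".toList]

-- the positional scan: at each suffix test whether some keyword is a prefix
def pvScan : List Char → Bool
  | [] => false
  | c :: rest => pvKeywords.any (fun kw => kw.isPrefixOf (c :: rest)) || pvScan rest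

def is_remote_job_alt (text : String) : Bool :=
  if text = "" then false
  else pvScan (PySem.Chars.lower text.toList)

-- ===== PRECONDITION & SPEC =====
def Spec_is_remote_job (text : String) (out : Bool) : Prop := out = is_remote_job_alt text
instance (text : String) (out : Bool) : Decidable (Spec_is_remote_job text out) := by unfold Spec_is_remote_job; infer_instance

-- ===== CLAIM (what is proved, stated in full; the proofs are below) =====
def Claim_equal_is_remote_job : Prop := ∀ (text : String), Dom_is_remote_job text → Spec_is_remote_job text (is_remote_job text)

-- ===== LEMMAS AND PROOFS =====

lemma pvKeywords_ne_nil : ∀ kw ∈ pvKeywords, kw ≠ [] := by decide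

-- positional-scan characterisation: pvScan finds a keyword iff some keyword
-- is a prefix of some suffix
lemma pvScan_iff (l : List Char) :
    pvScan l = true ↔ ∃ kw ∈ pvKeywords, ∃ j, kw <+: l.drop j := by
  induction l with
  | nil =>
      simp only [pvScan, List.drop_nil, List.prefix_nil, Bool.false_eq_true, false_iff]
      rintro ⟨kw, hkw, j, h⟩
      exact pvKeywords_ne_nil kw hkw h
  | cons c rest ih =>
      simp only [pvScan, Bool.or_eq_true, List.any_eq_true, List.isPrefixOf_iff_prefix, ih]
      constructor
      · rintro (⟨kw, hkw, hp⟩ | ⟨kw, hkw, j, hp⟩)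
        · exact ⟨kw, hkw, 0, by simpa using hp⟩
        · exact ⟨kw, hkw, j + 1, by simpa using hp⟩
      · rintro ⟨kw, hkw, j, hp⟩
        cases j with
        | zero => exact Or.inl ⟨kw, hkw, by simpa using hp⟩
        | succ j => exact Or.inr ⟨kw, hkw, j, by simpa using hp⟩

-- the scan equals the any-of-substring-tests A performs
lemma pvScan_eq_any (l : List Char) :
    pvScan l = pvKeywords.any (fun kw => PySem.Chars.isIn kw l) := by
  rw [Bool.eq_iff_iff, pvScan_iff]
  simp only [List.any_eq_true]
  constructor
  · rintro ⟨kw, hkw, j, hp⟩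
    exact ⟨kw, hkw, (PySem.Chars.exists_prefix_drop_iff_isIn kw l).1 ⟨j, hp⟩⟩
  · rintro ⟨kw, hkw, h⟩
    obtain ⟨j, hp⟩ := (PySem.Chars.exists_prefix_drop_iff_isIn kw l).2 h
    exact ⟨kw, hkw, j, hp⟩

-- ===== VERDICT (by name: the statement is the Claim_ definition above) =====
theorem is_remote_job_spec : Claim_equal_is_remote_job := by
  intro text _
  unfold Spec_is_remote_job is_remote_job is_remote_job_alt
  by_cases h : text = ""
  · simp [h]
  · simp only [h, if_false]
    rw [pvScan_eq_any]
    simp [pvKeywords, PySem.Str.isIn_eq, PySem.Str.toList_lower]
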